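-- pv_equiv track=rewrite | github.com/wahoman/algorithm_study | Lv0/left_right.py | solution
-- ===== SOURCE A (Python) =====
-- def solution(str_list):
--     answer = []
--     for i in range(len(str_list)):
--         if str_list[i]=='l':
--             for j in range(i):
--                 answer.append(str_list[j])
--             break
--         if str_list[i]=='r':
--             for j in range(i+1,len(str_list)):
--                 answer.append(str_list[j])
--             break
--
--     return answer
-- ===== SOURCE B (Python) =====
-- def solution(str_list):
--     # single accumulating pass: collect into acc; on first 'l' return acc;
--     # on first 'r' discard acc and start collecting the rest; no indices, no slices
--     acc = []
--     seen_r = False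
--     for x in str_list:
--         if not seen_r:
--             if x == 'l':
--                 return acc
--             if x == 'r':
--                 acc = []
--                 seen_r = True
--                 continue
--         acc.append(x)
--     return acc if seen_r else []
-- ===== Notes on version B (the rewrite author's own statement) =====
-- stated objective: alternative
-- what changed: Replaces A's index-based scan-then-copy (outer range loop with break, then an inner loop copying a range of indices) by a single accumulating pass over the elements with a seen_r flag: collect into acc, return acc at the first 'l', reset acc at the first 'r' and keep collecting; no indices or second pass.
import Mathlib
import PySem

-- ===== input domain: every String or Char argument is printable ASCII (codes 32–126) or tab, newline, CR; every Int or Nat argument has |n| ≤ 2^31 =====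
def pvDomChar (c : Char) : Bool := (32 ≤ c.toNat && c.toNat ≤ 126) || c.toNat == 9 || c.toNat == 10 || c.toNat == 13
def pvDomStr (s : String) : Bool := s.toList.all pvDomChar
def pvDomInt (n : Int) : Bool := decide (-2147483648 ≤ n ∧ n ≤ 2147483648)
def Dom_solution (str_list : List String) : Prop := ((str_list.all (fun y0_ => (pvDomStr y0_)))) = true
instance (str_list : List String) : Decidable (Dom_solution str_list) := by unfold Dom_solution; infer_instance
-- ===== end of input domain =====

-- B replaces A's index scan + inner copy loops by one accumulating pass with a seen_r flag (alternative decomposition).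

-- ===== PORT A =====
-- outer 'for i in range(len(str_list))' with break, as recursion over the remaining
-- suffix with the current index i; the inner append loops are literal foldl's over the ranges
def solutionGo (orig : List String) : List String → Nat → List String
  | [], _ => []
  | x :: rest, i =>
    if x = "l" then
      (PySem.List.pyRange 0 (i : Int) 1).foldl
        (fun acc j => acc ++ [PySem.List.pyGetD orig j ""]) []
    else if x = "r" then
      (PySem.List.pyRange ((i : Int) + 1) (PySem.List.len orig) 1).foldl
        (fun acc j => acc ++ [PySem.List.pyGetD orig j ""]) []
    else solutionGo orig rest (i + 1)

def solution (str_list : List String) : List String :=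
  solutionGo str_list str_list 0

-- ===== PORT B =====
-- the for loop with its acc list and seen_r flag, as structural recursion over the list
def solutionAltGo : List String → List String → Bool → List String
  | [], acc, seenR => if seenR then acc else []
  | x :: rest, acc, seenR =>
    if !seenR && x = "l" then acc
    else if !seenR && x = "r" then solutionAltGo rest [] true
    else solutionAltGo rest (acc ++ [x]) seenR

def solution_alt (str_list : List String) : List String :=
  solutionAltGo str_list [] false

-- ===== PRECONDITION & SPEC =====
def Spec_solution (str_list : List String) (out : List String) : Prop := out = solution_alt str_list
instance (str_list : List String) (out : List String) : Decidable (Spec_solution str_list out) := by unfold Spec_solution; infer_instance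

-- ===== CLAIM (what is proved, stated in full; the proofs are below) =====
def Claim_equal_solution : Prop := ∀ (str_list : List String), Dom_solution str_list → Spec_solution str_list (solution str_list)

-- ===== LEMMAS AND PROOFS =====

lemma foldl_append_singleton {α β : Type} (f : α → β) :
    ∀ (l : List α) (acc : List β),
      l.foldl (fun a j => a ++ [f j]) acc = acc ++ l.map f := by
  intro l
  induction l with
  | nil => intro acc; simp
  | cons x xs ih => intro acc; simp [List.foldl, ih]

lemma map_pyRange_take (orig : List String) (i : Nat) (hi : i ≤ orig.length) :
    (PySem.List.pyRange 0 (i : Int) 1).map (fun j => PySem.List.pyGetD orig j "") =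
      orig.take i := by
  apply List.ext_getElem
  · simp [PySem.List.length_pyRange_one]
    omega
  · intro k h1 h2
    have hk : k < i := by
      simpa [PySem.List.length_pyRange_one] using h1
    rw [List.getElem_map, PySem.List.getElem_pyRange_one]
    have h0 : (0 : Int) + (k : Int) = ((k : Nat) : Int) := by omega
    rw [h0, PySem.List.pyGetD_natCast, List.getD_eq_getElem?_getD,
      List.getElem?_eq_getElem (show k < orig.length by omega)]
    simp [List.getElem_take]

lemma map_pyRange_drop (orig : List String) (i : Nat) :
    (PySem.List.pyRange ((i : Int) + 1) (PySem.List.len orig) 1).map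
        (fun j => PySem.List.pyGetD orig j "") = orig.drop (i + 1) := by
  have h : ((i : Int) + 1) = (((i + 1 : Nat)) : Int) := by norm_cast
  rw [h, PySem.List.map_pyGetD_pyRange orig "" (by positivity)]
  simp

-- once seen_r is set, B's loop appends every remaining element to acc
lemma altGo_true : ∀ (rest acc : List String),
    solutionAltGo rest acc true = acc ++ rest := by
  intro rest
  induction rest with
  | nil => intro acc; simp [solutionAltGo]
  | cons x xs ih => intro acc; simp [solutionAltGo, ih]

lemma go_eq (orig : List String) :
    ∀ (rest : List String) (i : Nat), orig.drop i = rest →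
      solutionGo orig rest i = solutionAltGo rest (orig.take i) false := by
  intro rest
  induction rest with
  | nil =>
    intro i hdrop
    simp [solutionGo, solutionAltGo]
  | cons x rest ih =>
    intro i hdrop
    have hilt : i < orig.length := by
      have := congrArg List.length hdrop
      simp at this
      omega
    have hx : orig[i] = x := by
      have := List.drop_eq_getElem_cons hilt (l := orig)
      rw [hdrop] at this
      exact (List.cons.injEq _ _ _ _ ▸ this).1.symm
    have hrest : orig.drop (i + 1) = rest := by
      have := List.drop_eq_getElem_cons hilt (l := orig)
      rw [hdrop] at this
      exact (List.cons.injEq _ _ _ _ ▸ this).2.symm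
    by_cases hxl : x = "l"
    · rw [solutionGo, if_pos hxl, foldl_append_singleton, List.nil_append,
        map_pyRange_take orig i (le_of_lt hilt),
        solutionAltGo]
      simp [hxl]
    · by_cases hxr : x = "r"
      · subst hxr
        rw [solutionGo, if_neg hxl, if_pos rfl, foldl_append_singleton, List.nil_append,
          map_pyRange_drop orig i, solutionAltGo]
        simp [altGo_true, hrest]
      · rw [solutionGo, if_neg hxl, if_neg hxr, solutionAltGo,
          if_neg (by simp; intro h; exact hxl h), if_neg (by simp; intro h; exact hxr h)]
        have htsucc : orig.take (i + 1) = orig.take i ++ [x] := by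
          rw [List.take_add_one, List.getElem?_eq_getElem hilt, hx]
          rfl
        rw [← htsucc]
        exact ih (i + 1) hrest

-- ===== VERDICT (by name: the statement is the Claim_ definition above) =====
theorem solution_spec : Claim_equal_solution := by
  intro str_list _
  unfold Spec_solution solution solution_alt
  exact go_eq str_list str_list 0 (by simp)
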